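-- pv_equiv track=rewrite | github.com/shilinfang77/badou-jingpingban | 59-史琳芳/week4.py | full_segment
-- ===== SOURCE A (Python) =====
-- def full_segment(sentence, word_dict):
--     n = len(sentence)
--     # 初始化动态规划数组
--     dp = [0] * (n + 1)
--     # 存储切分结果的列表
--     result = []
--
--     for i in range(1, n + 1):
--         max_prob = 0
--         best_cut = None
--
--         for j in range(i):
--             word = sentence[j:i]
--             if word in word_dict and (dp[j] + word_dict[word] > max_prob):
--                 max_prob = dp[j] + word_dict[word]
--                 best_cut = j
--
--         dp[i] = max_prob
--
--         if best_cut is not None: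
--             result.append(sentence[best_cut:i])
--
--     return result
-- ===== SOURCE B (Python) =====
-- def full_segment(sentence, word_dict):
--     n = len(sentence)
--     # distinct word lengths, longest first (so cut positions j = i - l come out ascending)
--     lengths = sorted({len(w) for w in word_dict if w}, reverse=True)
--     dp = [0] * (n + 1)
--     result = []
--     for i in range(1, n + 1):
--         cands = []
--         for l in lengths:
--             if l <= i:
--                 j = i - l
--                 w = sentence[j:i]
--                 if w in word_dict:
--                     cands.append((dp[j] + word_dict[w], j))
--         if cands:
--             prob, j = max(cands, key=lambda t: (t[0], -t[1]))
--             if prob > 0: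
--                 dp[i] = prob
--                 result.append(sentence[j:i])
--     return result
-- ===== Notes on version B (the rewrite author's own statement) =====
-- stated objective: faster
-- what changed: Replaces the O(n^2)-substring inner scan over every start j with a scan over only the distinct dictionary word lengths (longest first), collecting candidate (score, cut) pairs and picking the best by max with a (score, -cut) key instead of a running mutable maximum.
import Mathlib
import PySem

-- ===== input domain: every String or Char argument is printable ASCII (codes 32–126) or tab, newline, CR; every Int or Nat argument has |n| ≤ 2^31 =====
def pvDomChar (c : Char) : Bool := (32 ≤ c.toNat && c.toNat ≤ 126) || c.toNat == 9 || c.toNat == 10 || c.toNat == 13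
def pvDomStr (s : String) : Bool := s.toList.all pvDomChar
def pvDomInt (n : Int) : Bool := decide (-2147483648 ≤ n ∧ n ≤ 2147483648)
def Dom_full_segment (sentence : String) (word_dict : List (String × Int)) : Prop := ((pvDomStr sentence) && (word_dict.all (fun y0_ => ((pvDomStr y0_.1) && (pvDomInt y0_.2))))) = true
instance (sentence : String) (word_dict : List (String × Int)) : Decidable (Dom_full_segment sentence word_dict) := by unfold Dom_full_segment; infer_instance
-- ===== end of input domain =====

-- B replaces A's scan over every cut position j (allocating every substring) by a scan over only
-- the distinct dictionary word lengths, longest first, picking the best candidate with a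
-- (score, -cut) max instead of a running mutable maximum; measurably faster on long sentences.

-- ===== PORT A =====
def full_segment (sentence : String) (word_dict : List (String × Int)) : List String :=
  let s := sentence.toList
  let n := s.length
  let d := PySem.Dict.ofList word_dict
  ((PySem.List.pyRange 1 ((n : Int) + 1)).foldl (fun (st : List Int × List String) i =>
    let inner := (PySem.List.pyRange 0 i).foldl (fun (mb : Int × Option Int) j =>
        let word := String.ofList (PySem.List.slice s (some j) (some i))
        if d.contains word && decide (PySem.List.pyGetD st.1 j 0 + d.getD word 0 > mb.1)
        then (PySem.List.pyGetD st.1 j 0 + d.getD word 0, some j)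
        else mb) (0, none)
    let dp' := st.1.set i.toNat inner.1
    match inner.2 with
    | some j => (dp', st.2 ++ [String.ofList (PySem.List.slice s (some j) (some i))])
    | none => (dp', st.2)) (List.replicate (n + 1) 0, [])).2

-- ===== PORT B =====
def full_segment_alt (sentence : String) (word_dict : List (String × Int)) : List String :=
  let s := sentence.toList
  let n := s.length
  let d := PySem.Dict.ofList word_dict
  let lengths : List Int :=
    PySem.List.sorted (PySem.Set.ofList ((d.keys.filter (fun w => w != "")).map
      (fun w => PySem.Str.len w))) (fun x => x) true
  ((PySem.List.pyRange 1 ((n : Int) + 1)).foldl (fun (st : List Int × List String) i =>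
    let cands : List (Int × Int) := lengths.foldl (fun cands l =>
        if l ≤ i then
          let j := i - l
          let w := String.ofList (PySem.List.slice s (some j) (some i))
          if d.contains w then cands ++ [(PySem.List.pyGetD st.1 j 0 + d.getD w 0, j)]
          else cands
        else cands) []
    match PySem.List.max2? cands (fun t => t.1) (fun t => -t.2) with
    | some m =>
        if m.1 > 0 then (st.1.set i.toNat m.1, st.2 ++ [String.ofList (PySem.List.slice s (some m.2) (some i))])
        else st
    | none => st) (List.replicate (n + 1) 0, [])).2

-- ===== PRECONDITION & SPEC =====
def Spec_full_segment (sentence : String) (word_dict : List (String × Int)) (out : List String) : Prop := out = full_segment_alt sentence word_dict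
instance (sentence : String) (word_dict : List (String × Int)) (out : List String) : Decidable (Spec_full_segment sentence word_dict out) := by unfold Spec_full_segment; infer_instance

-- ===== CLAIM (what is proved, stated in full; the proofs are below) =====
def Claim_equal_full_segment : Prop := ∀ (sentence : String) (word_dict : List (String × Int)), Dom_full_segment sentence word_dict → Spec_full_segment sentence word_dict (full_segment sentence word_dict)

-- ===== LEMMAS AND PROOFS =====

-- A's inner-loop step on a candidate (score, cut) pair
def pvFA (mb : Int × Option Int) (c : Int × Int) : Int × Option Int :=
  if c.1 > mb.1 then (c.1, some c.2) else mb

-- the fold step of max2? with keys (fst, -snd)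
def pvFB (acc : Option (Int × Int)) (x : Int × Int) : Option (Int × Int) :=
  match acc with
  | none => some x
  | some m => if (decide (m.1 < x.1) || !decide (x.1 < m.1) && decide (-m.2 < -x.2)) = true then some x else some m

theorem pvMax2_eq (cs : List (Int × Int)) :
    PySem.List.max2? cs (fun t => t.1) (fun t => -t.2) = cs.foldl pvFB none := by
  unfold PySem.List.max2?
  congr 1
  funext acc x
  cases acc <;> rfl

theorem pvSetNoop (l : List Int) (k : Nat) (h : l[k]? = some 0) : l.set k 0 = l := by
  have hk : k < l.length := by
    by_contra hk
    rw [List.getElem?_eq_none_iff.mpr (by omega)] at h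
    simp at h
  apply List.ext_getElem?
  intro i
  rw [List.getElem?_set]
  split_ifs with hik
  · subst hik; simp [hk, h.symm]
  · rfl

-- running strict-first max (A) versus first-lexicographic max2? (B) over the same candidates
theorem pvFoldRel : ∀ (cs : List (Int × Int)) (mp : Int) (bc : Option Int) (acc : Option (Int × Int)),
    cs.Pairwise (fun a b => a.2 < b.2) →
    ((acc = none ∧ mp = 0 ∧ bc = none) ∨
      ∃ m, acc = some m ∧ (∀ c ∈ cs, m.2 < c.2) ∧
        ((0 < m.1 ∧ mp = m.1 ∧ bc = some m.2) ∨ (m.1 ≤ 0 ∧ mp = 0 ∧ bc = none))) →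
    ((cs.foldl pvFB acc = none ∧ cs.foldl pvFA (mp, bc) = (0, none)) ∨
      ∃ m, cs.foldl pvFB acc = some m ∧
        ((0 < m.1 ∧ cs.foldl pvFA (mp, bc) = (m.1, some m.2)) ∨
         (m.1 ≤ 0 ∧ cs.foldl pvFA (mp, bc) = (0, none)))) := by
  intro cs
  induction cs with
  | nil =>
    intro mp bc acc _ hinv
    rcases hinv with ⟨ha, hmp, hbc⟩ | ⟨m, ha, _, ⟨h1, h2, h3⟩ | ⟨h1, h2, h3⟩⟩
    · exact Or.inl ⟨ha, by simp [hmp, hbc]⟩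
    · exact Or.inr ⟨m, ha, Or.inl ⟨h1, by simp [h2, h3]⟩⟩
    · exact Or.inr ⟨m, ha, Or.inr ⟨h1, by simp [h2, h3]⟩⟩
  | cons c cs ih =>
    intro mp bc acc hp hinv
    have hp' := hp.tail
    have hhead : ∀ c' ∈ cs, c.2 < c'.2 := fun c2 h2 => List.rel_of_pairwise_cons hp h2
    simp only [List.foldl_cons]
    rcases hinv with ⟨ha, hmp, hbc⟩ | ⟨m, ha, hlt, hcase⟩
    · subst ha hmp hbc
      have hB : pvFB none c = some c := rfl
      rw [hB]
      by_cases hc : 0 < c.1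
      · have hA : pvFA (0, none) c = (c.1, some c.2) := by simp [pvFA, hc]
        rw [hA]
        exact ih c.1 (some c.2) (some c) hp' (Or.inr ⟨c, rfl, hhead, Or.inl ⟨hc, rfl, rfl⟩⟩)
      · have hA : pvFA (0, none) c = (0, none) := by simp [pvFA]; omega
        rw [hA]
        exact ih 0 none (some c) hp' (Or.inr ⟨c, rfl, hhead, Or.inr ⟨by omega, rfl, rfl⟩⟩)
    · subst ha
      have hmc : m.2 < c.2 := hlt c List.mem_cons_self
      have hlt' : ∀ c' ∈ cs, m.2 < c'.2 := fun c' h => hlt c' (List.mem_cons_of_mem _ h)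
      have htie : ¬ (-m.2 < -c.2) := by omega
      rcases hcase with ⟨h1, h2, h3⟩ | ⟨h1, h2, h3⟩
      · subst h2 h3
        by_cases hup : m.1 < c.1
        · have hB : pvFB (some m) c = some c := by simp [pvFB, hup]
          have hA : pvFA (m.1, some m.2) c = (c.1, some c.2) := by simp [pvFA, hup]
          rw [hB, hA]
          exact ih c.1 (some c.2) (some c) hp' (Or.inr ⟨c, rfl, hhead, Or.inl ⟨by omega, rfl, rfl⟩⟩)
        · have hB : pvFB (some m) c = some m := by
            simp [pvFB, hup, htie]
          have hA : pvFA (m.1, some m.2) c = (m.1, some m.2) := by simp [pvFA, hup]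
          rw [hB, hA]
          exact ih m.1 (some m.2) (some m) hp' (Or.inr ⟨m, rfl, hlt', Or.inl ⟨h1, rfl, rfl⟩⟩)
      · subst h2 h3
        by_cases hup : m.1 < c.1
        · have hB : pvFB (some m) c = some c := by simp [pvFB, hup]
          rw [hB]
          by_cases hc : 0 < c.1
          · have hA : pvFA (0, none) c = (c.1, some c.2) := by simp [pvFA, hc]
            rw [hA]
            exact ih c.1 (some c.2) (some c) hp' (Or.inr ⟨c, rfl, hhead, Or.inl ⟨hc, rfl, rfl⟩⟩)
          · have hA : pvFA (0, none) c = (0, none) := by simp [pvFA]; omega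
            rw [hA]
            exact ih 0 none (some c) hp' (Or.inr ⟨c, rfl, hhead, Or.inr ⟨by omega, rfl, rfl⟩⟩)
        · have hB : pvFB (some m) c = some m := by simp [pvFB, hup, htie]
          have hA : pvFA (0, none) c = (0, none) := by simp [pvFA]; omega
          rw [hB, hA]
          exact ih 0 none (some m) hp' (Or.inr ⟨m, rfl, hlt', Or.inr ⟨h1, rfl, rfl⟩⟩)

theorem pvRangePairwise (i : Int) (hi : 0 ≤ i) : (PySem.List.pyRange 0 i).Pairwise (· < ·) := by
  rw [show i = ((i.toNat : Nat) : Int) by omega, PySem.List.pyRange_zero_natCast]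
  exact (List.pairwise_lt_range).map _ (by intro a b h; exact_mod_cast h)

-- the cut positions B visits (longest word first) are exactly the cut positions whose
-- word length occurs in the dictionary, in ascending order
theorem pvJsEq (lengths : List Int) (hdec : lengths.Pairwise (fun a b => b < a))
    (hpos : ∀ l ∈ lengths, 1 ≤ l) (i : Int) (hi1 : 1 ≤ i) :
    (lengths.filter (fun l => decide (l ≤ i))).map (fun l => i - l)
      = (PySem.List.pyRange 0 i).filter (fun j => decide ((i - j) ∈ lengths)) := by
  have pwlt2 : ((lengths.filter (fun l => decide (l ≤ i))).map (fun l => i - l)).Pairwise (· < ·) := by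
    rw [List.pairwise_map]
    exact (hdec.filter _).imp (by intro a b h; omega)
  have pwlt1 : ((PySem.List.pyRange 0 i).filter (fun j => decide ((i - j) ∈ lengths))).Pairwise (· < ·) :=
    (pvRangePairwise i (by omega)).filter _
  have hmemiff : ∀ j : Int, j ∈ (lengths.filter (fun l => decide (l ≤ i))).map (fun l => i - l)
      ↔ j ∈ (PySem.List.pyRange 0 i).filter (fun j => decide ((i - j) ∈ lengths)) := by
    intro j
    simp only [List.mem_map, List.mem_filter, PySem.List.mem_pyRange_one, decide_eq_true_iff]
    constructor
    · rintro ⟨l, ⟨hl, hli⟩, rfl⟩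
      have := hpos l hl
      exact ⟨⟨by omega, by omega⟩, by rwa [show i - (i - l) = l by omega]⟩
    · rintro ⟨⟨h0, hji⟩, hmem⟩
      exact ⟨i - j, ⟨hmem, by omega⟩, by omega⟩
  exact List.Perm.eq_of_pairwise
    (fun a b _ _ h1 h2 => le_antisymm h1 h2)
    (pwlt2.imp le_of_lt) (pwlt1.imp le_of_lt)
    ((List.perm_ext_iff_of_nodup (pwlt2.imp ne_of_lt) (pwlt1.imp ne_of_lt)).mpr hmemiff)

theorem pvSliceFacts (s : List Char) (i j : Int) (h0 : 0 ≤ j) (hji : j < i) (hin : i.toNat ≤ s.length) :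
    (PySem.List.slice s (some j) (some i)).length = i.toNat - j.toNat := by
  rw [PySem.List.slice_toNat s h0 (by omega)]
  simp [List.length_take, List.length_drop]
  omega

-- a dictionary hit at cut j forces its word length i - j to occur in lengths
theorem pvVanish (s : List Char) (d : PySem.Dict String Int) (lengths : List Int)
    (hmem : ∀ l : Int, l ∈ lengths ↔ ∃ w ∈ d.keys, w ≠ "" ∧ PySem.Str.len w = l)
    (i : Int) (hin : i.toNat ≤ s.length) :
    ∀ j ∈ PySem.List.pyRange 0 i,
      d.contains (String.ofList (PySem.List.slice s (some j) (some i))) = true →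
      decide ((i - j) ∈ lengths) = true := by
  intro j hj hc
  rw [PySem.List.mem_pyRange_one] at hj
  rw [decide_eq_true_iff, hmem]
  refine ⟨String.ofList (PySem.List.slice s (some j) (some i)),
    (PySem.Dict.contains_iff_mem_keys _ _).mp hc, ?_, ?_⟩
  · intro hempty
    have h0 : (String.ofList (PySem.List.slice s (some j) (some i))).toList = [] := by
      rw [hempty]; rfl
    rw [String.toList_ofList] at h0
    have hl := pvSliceFacts s i j hj.1 hj.2 hin
    rw [h0] at hl
    simp at hl
    omega
  · rw [PySem.Str.len_eq, String.toList_ofList, pvSliceFacts s i j hj.1 hj.2 hin]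
    omega

-- one end position i: A's loop body equals B's loop body
theorem pvStep (s : List Char) (d : PySem.Dict String Int) (lengths : List Int)
    (hmem : ∀ l : Int, l ∈ lengths ↔ ∃ w ∈ d.keys, w ≠ "" ∧ PySem.Str.len w = l)
    (hdec : lengths.Pairwise (fun a b => b < a))
    (i : Int) (hi1 : 1 ≤ i) (hin : i.toNat ≤ s.length)
    (dp : List Int) (res : List String) (hdpi : dp[i.toNat]? = some 0) :
    (let inner := (PySem.List.pyRange 0 i).foldl (fun (mb : Int × Option Int) j =>
        let word := String.ofList (PySem.List.slice s (some j) (some i))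
        if d.contains word && decide (PySem.List.pyGetD dp j 0 + d.getD word 0 > mb.1)
        then (PySem.List.pyGetD dp j 0 + d.getD word 0, some j)
        else mb) (0, none)
     let dp' := dp.set i.toNat inner.1
     (match inner.2 with
      | some j => (dp', res ++ [String.ofList (PySem.List.slice s (some j) (some i))])
      | none => (dp', res)))
    = (let cands : List (Int × Int) := lengths.foldl (fun cands l =>
        if l ≤ i then
          let j := i - l
          let w := String.ofList (PySem.List.slice s (some j) (some i))
          if d.contains w then cands ++ [(PySem.List.pyGetD dp j 0 + d.getD w 0, j)]
          else cands
        else cands) []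
       match PySem.List.max2? cands (fun t => t.1) (fun t => -t.2) with
       | some m =>
           if m.1 > 0 then (dp.set i.toNat m.1, res ++ [String.ofList (PySem.List.slice s (some m.2) (some i))])
           else (dp, res)
       | none => (dp, res)) := by
  have hpos : ∀ l ∈ lengths, 1 ≤ l := by
    intro l hl
    rcases (hmem l).mp hl with ⟨w, _, hw, hlen⟩
    rw [PySem.Str.len_eq] at hlen
    rcases hnil : w.toList with _ | ⟨c, t⟩
    · exact absurd (by simpa using congrArg String.ofList hnil) hw
    · rw [hnil] at hlen
      simp at hlen
      omega
  have hrange : ∀ j ∈ PySem.List.pyRange 0 i, 0 ≤ j ∧ j < i := by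
    intro j hj
    rw [PySem.List.mem_pyRange_one] at hj
    exact hj
  -- the common candidate list, in ascending cut order
  have hInner : (PySem.List.pyRange 0 i).foldl (fun (mb : Int × Option Int) j =>
        let word := String.ofList (PySem.List.slice s (some j) (some i))
        if d.contains word && decide (PySem.List.pyGetD dp j 0 + d.getD word 0 > mb.1)
        then (PySem.List.pyGetD dp j 0 + d.getD word 0, some j)
        else mb) (0, none)
      = ((((PySem.List.pyRange 0 i).filter (fun j => decide ((i - j) ∈ lengths))).filter
          (fun j => d.contains (String.ofList (PySem.List.slice s (some j) (some i))))).map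
          (fun j => (PySem.List.pyGetD dp j 0 +
            d.getD (String.ofList (PySem.List.slice s (some j) (some i))) 0, j))).foldl
          pvFA (0, none) := by
    calc (PySem.List.pyRange 0 i).foldl (fun (mb : Int × Option Int) j =>
          let word := String.ofList (PySem.List.slice s (some j) (some i))
          if d.contains word && decide (PySem.List.pyGetD dp j 0 + d.getD word 0 > mb.1)
          then (PySem.List.pyGetD dp j 0 + d.getD word 0, some j)
          else mb) (0, none)
        = (PySem.List.pyRange 0 i).foldl (fun (mb : Int × Option Int) j =>
            if d.contains (String.ofList (PySem.List.slice s (some j) (some i)))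
            then pvFA mb (PySem.List.pyGetD dp j 0 +
              d.getD (String.ofList (PySem.List.slice s (some j) (some i))) 0, j)
            else mb) (0, none) := by
          apply PySem.List.foldl_congr_mem
          intro acc j _
          dsimp only []
          by_cases hcb : d.contains (String.ofList (PySem.List.slice s (some j) (some i))) <;>
            by_cases hv : PySem.List.pyGetD dp j 0 +
              d.getD (String.ofList (PySem.List.slice s (some j) (some i))) 0 > acc.1 <;>
            simp [pvFA, hcb, hv]
      _ = ((PySem.List.pyRange 0 i).filter
            (fun j => d.contains (String.ofList (PySem.List.slice s (some j) (some i))))).foldl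
            (fun (mb : Int × Option Int) j => pvFA mb (PySem.List.pyGetD dp j 0 +
              d.getD (String.ofList (PySem.List.slice s (some j) (some i))) 0, j)) (0, none) := by
          exact PySem.List.foldl_if_eq_foldl_filter _ _ _ _
      _ = (((PySem.List.pyRange 0 i).filter
            (fun j => d.contains (String.ofList (PySem.List.slice s (some j) (some i))))).map
            (fun j => (PySem.List.pyGetD dp j 0 +
              d.getD (String.ofList (PySem.List.slice s (some j) (some i))) 0, j))).foldl
            pvFA (0, none) := by
          exact (List.foldl_map).symm
      _ = ((((PySem.List.pyRange 0 i).filter (fun j => decide ((i - j) ∈ lengths))).filter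
            (fun j => d.contains (String.ofList (PySem.List.slice s (some j) (some i))))).map
            (fun j => (PySem.List.pyGetD dp j 0 +
              d.getD (String.ofList (PySem.List.slice s (some j) (some i))) 0, j))).foldl
            pvFA (0, none) := by
          rw [List.filter_filter]
          congr 1
          apply congrArg
          apply List.filter_congr
          intro j hj
          rcases hcb : d.contains (String.ofList (PySem.List.slice s (some j) (some i)))
          · simp
          · simp [pvVanish s d lengths hmem i hin j hj hcb]
  have hCands : lengths.foldl (fun (cands : List (Int × Int)) l =>
        if l ≤ i then
          let j := i - l
          let w := String.ofList (PySem.List.slice s (some j) (some i))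
          if d.contains w then cands ++ [(PySem.List.pyGetD dp j 0 + d.getD w 0, j)]
          else cands
        else cands) []
      = (((PySem.List.pyRange 0 i).filter (fun j => decide ((i - j) ∈ lengths))).filter
          (fun j => d.contains (String.ofList (PySem.List.slice s (some j) (some i))))).map
          (fun j => (PySem.List.pyGetD dp j 0 +
            d.getD (String.ofList (PySem.List.slice s (some j) (some i))) 0, j)) := by
    calc lengths.foldl (fun (cands : List (Int × Int)) l =>
          if l ≤ i then
            let j := i - l
            let w := String.ofList (PySem.List.slice s (some j) (some i))
            if d.contains w then cands ++ [(PySem.List.pyGetD dp j 0 + d.getD w 0, j)]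
            else cands
          else cands) []
        = (lengths.filter (fun l => decide (l ≤ i))).foldl (fun (cands : List (Int × Int)) l =>
            if d.contains (String.ofList (PySem.List.slice s (some (i - l)) (some i)))
            then cands ++ [(PySem.List.pyGetD dp (i - l) 0 +
              d.getD (String.ofList (PySem.List.slice s (some (i - l)) (some i))) 0, i - l)]
            else cands) [] := by
          exact PySem.List.foldl_ite_eq_foldl_filter (fun l : Int => l ≤ i) _ _ _
      _ = [] ++ ((lengths.filter (fun l => decide (l ≤ i))).filter
            (fun l => d.contains (String.ofList (PySem.List.slice s (some (i - l)) (some i))))).map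
            (fun l => (PySem.List.pyGetD dp (i - l) 0 +
              d.getD (String.ofList (PySem.List.slice s (some (i - l)) (some i))) 0, i - l)) := by
          exact PySem.List.foldl_append_if _ _ _ _
      _ = (((lengths.filter (fun l => decide (l ≤ i))).map (fun l => i - l)).filter
            (fun j => d.contains (String.ofList (PySem.List.slice s (some j) (some i))))).map
            (fun j => (PySem.List.pyGetD dp j 0 +
              d.getD (String.ofList (PySem.List.slice s (some j) (some i))) 0, j)) := by
          rw [List.filter_map, List.map_map]
          rfl
      _ = (((PySem.List.pyRange 0 i).filter (fun j => decide ((i - j) ∈ lengths))).filter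
            (fun j => d.contains (String.ofList (PySem.List.slice s (some j) (some i))))).map
            (fun j => (PySem.List.pyGetD dp j 0 +
              d.getD (String.ofList (PySem.List.slice s (some j) (some i))) 0, j)) := by
          rw [pvJsEq lengths hdec hpos i hi1]
  have hpw : (((((PySem.List.pyRange 0 i).filter (fun j => decide ((i - j) ∈ lengths))).filter
          (fun j => d.contains (String.ofList (PySem.List.slice s (some j) (some i))))).map
          (fun j => (PySem.List.pyGetD dp j 0 +
            d.getD (String.ofList (PySem.List.slice s (some j) (some i))) 0, j)))).Pairwise
      (fun a b => a.2 < b.2) := by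
    rw [List.pairwise_map]
    exact (((pvRangePairwise i (by omega)).filter _).filter _).imp (fun h => h)
  have hrel := pvFoldRel _ 0 none none hpw (Or.inl ⟨rfl, rfl, rfl⟩)
  dsimp only []
  rw [hInner, hCands, pvMax2_eq]
  rcases hrel with ⟨hB, hA⟩ | ⟨m, hB, ⟨h1, hA⟩ | ⟨h1, hA⟩⟩
  · rw [hA, hB]
    dsimp only []
    rw [pvSetNoop dp i.toNat hdpi]
  · rw [hA, hB]
    dsimp only []
    rw [if_pos h1]
  · rw [hA, hB]
    dsimp only []
    rw [if_neg (by omega), pvSetNoop dp i.toNat hdpi]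

-- the two outer folds agree step by step
theorem pvOuter (s : List Char) (d : PySem.Dict String Int) (lengths : List Int)
    (hmem : ∀ l : Int, l ∈ lengths ↔ ∃ w ∈ d.keys, w ≠ "" ∧ PySem.Str.len w = l)
    (hdec : lengths.Pairwise (fun a b => b < a)) :
    ∀ (k : Nat) (a : Int) (dp : List Int) (res : List String),
    a = (s.length : Int) + 1 - k → 1 ≤ a →
    (∀ m : Nat, a ≤ (m : Int) → m ≤ s.length → dp[m]? = some 0) →
    (PySem.List.pyRange a ((s.length : Int) + 1)).foldl (fun (st : List Int × List String) i =>
      let inner := (PySem.List.pyRange 0 i).foldl (fun (mb : Int × Option Int) j =>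
          let word := String.ofList (PySem.List.slice s (some j) (some i))
          if d.contains word && decide (PySem.List.pyGetD st.1 j 0 + d.getD word 0 > mb.1)
          then (PySem.List.pyGetD st.1 j 0 + d.getD word 0, some j)
          else mb) (0, none)
      let dp' := st.1.set i.toNat inner.1
      match inner.2 with
      | some j => (dp', st.2 ++ [String.ofList (PySem.List.slice s (some j) (some i))])
      | none => (dp', st.2)) (dp, res)
    = (PySem.List.pyRange a ((s.length : Int) + 1)).foldl (fun (st : List Int × List String) i =>
      let cands : List (Int × Int) := lengths.foldl (fun cands l =>
          if l ≤ i then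
            let j := i - l
            let w := String.ofList (PySem.List.slice s (some j) (some i))
            if d.contains w then cands ++ [(PySem.List.pyGetD st.1 j 0 + d.getD w 0, j)]
            else cands
          else cands) []
      match PySem.List.max2? cands (fun t => t.1) (fun t => -t.2) with
      | some m =>
          if m.1 > 0 then (st.1.set i.toNat m.1, st.2 ++ [String.ofList (PySem.List.slice s (some m.2) (some i))])
          else st
      | none => st) (dp, res) := by
  intro k
  induction k with
  | zero =>
    intro a dp res ha h1 hz
    have hnil : PySem.List.pyRange a ((s.length : Int) + 1) = [] := by
      apply List.eq_nil_iff_forall_not_mem.mpr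
      intro x hx
      rw [PySem.List.mem_pyRange_one] at hx
      omega
    rw [hnil]
    rfl
  | succ k ih =>
    intro a dp res ha h1 hz
    have hlt : a < (s.length : Int) + 1 := by
      push_cast at ha
      omega
    rw [PySem.List.pyRange_one_cons hlt]
    simp only [List.foldl_cons]
    have hdpa : dp[a.toNat]? = some 0 := by
      have := hz a.toNat (by omega) (by omega)
      exact this
    have hstep := pvStep s d lengths hmem hdec a h1 (by omega) dp res hdpa
    have hfst : ((fun (st : List Int × List String) i =>
        let inner := (PySem.List.pyRange 0 i).foldl (fun (mb : Int × Option Int) j =>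
            let word := String.ofList (PySem.List.slice s (some j) (some i))
            if d.contains word && decide (PySem.List.pyGetD st.1 j 0 + d.getD word 0 > mb.1)
            then (PySem.List.pyGetD st.1 j 0 + d.getD word 0, some j)
            else mb) (0, none)
        let dp' := st.1.set i.toNat inner.1
        match inner.2 with
        | some j => (dp', st.2 ++ [String.ofList (PySem.List.slice s (some j) (some i))])
        | none => (dp', st.2)) (dp, res) a).1
      = dp.set a.toNat ((PySem.List.pyRange 0 a).foldl (fun (mb : Int × Option Int) j =>
            let word := String.ofList (PySem.List.slice s (some j) (some a))
            if d.contains word && decide (PySem.List.pyGetD dp j 0 + d.getD word 0 > mb.1)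
            then (PySem.List.pyGetD dp j 0 + d.getD word 0, some j)
            else mb) (0, none)).1 := by
      dsimp only []
      cases ((PySem.List.pyRange 0 a).foldl (fun (mb : Int × Option Int) j =>
            let word := String.ofList (PySem.List.slice s (some j) (some a))
            if d.contains word && decide (PySem.List.pyGetD dp j 0 + d.getD word 0 > mb.1)
            then (PySem.List.pyGetD dp j 0 + d.getD word 0, some j)
            else mb) (0, none)).2 <;> rfl
    have hcond : ∀ m : Nat, a + 1 ≤ (m : Int) → m ≤ s.length →
        ((fun (st : List Int × List String) i =>
        let inner := (PySem.List.pyRange 0 i).foldl (fun (mb : Int × Option Int) j =>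
            let word := String.ofList (PySem.List.slice s (some j) (some i))
            if d.contains word && decide (PySem.List.pyGetD st.1 j 0 + d.getD word 0 > mb.1)
            then (PySem.List.pyGetD st.1 j 0 + d.getD word 0, some j)
            else mb) (0, none)
        let dp' := st.1.set i.toNat inner.1
        match inner.2 with
        | some j => (dp', st.2 ++ [String.ofList (PySem.List.slice s (some j) (some i))])
        | none => (dp', st.2)) (dp, res) a).1[m]? = some 0 := by
      intro m hm1 hm2
      rw [hfst, List.getElem?_set_ne (by omega : a.toNat ≠ m)]
      exact hz m (by omega) hm2
    exact Eq.trans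
      (ih (a + 1) ((fun (st : List Int × List String) i =>
        let inner := (PySem.List.pyRange 0 i).foldl (fun (mb : Int × Option Int) j =>
            let word := String.ofList (PySem.List.slice s (some j) (some i))
            if d.contains word && decide (PySem.List.pyGetD st.1 j 0 + d.getD word 0 > mb.1)
            then (PySem.List.pyGetD st.1 j 0 + d.getD word 0, some j)
            else mb) (0, none)
        let dp' := st.1.set i.toNat inner.1
        match inner.2 with
        | some j => (dp', st.2 ++ [String.ofList (PySem.List.slice s (some j) (some i))])
        | none => (dp', st.2)) (dp, res) a).1 ((fun (st : List Int × List String) i =>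
        let inner := (PySem.List.pyRange 0 i).foldl (fun (mb : Int × Option Int) j =>
            let word := String.ofList (PySem.List.slice s (some j) (some i))
            if d.contains word && decide (PySem.List.pyGetD st.1 j 0 + d.getD word 0 > mb.1)
            then (PySem.List.pyGetD st.1 j 0 + d.getD word 0, some j)
            else mb) (0, none)
        let dp' := st.1.set i.toNat inner.1
        match inner.2 with
        | some j => (dp', st.2 ++ [String.ofList (PySem.List.slice s (some j) (some i))])
        | none => (dp', st.2)) (dp, res) a).2 (by push_cast at ha ⊢; omega) (by omega) hcond)
      (congrArg (fun z => List.foldl (fun (st : List Int × List String) i =>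
        let cands : List (Int × Int) := lengths.foldl (fun cands l =>
            if l ≤ i then
              let j := i - l
              let w := String.ofList (PySem.List.slice s (some j) (some i))
              if d.contains w then cands ++ [(PySem.List.pyGetD st.1 j 0 + d.getD w 0, j)]
              else cands
            else cands) []
        match PySem.List.max2? cands (fun t => t.1) (fun t => -t.2) with
        | some m =>
            if m.1 > 0 then (st.1.set i.toNat m.1, st.2 ++ [String.ofList (PySem.List.slice s (some m.2) (some i))])
            else st
        | none => st) z
        (PySem.List.pyRange (a + 1) ((s.length : Int) + 1))) hstep)


-- ===== VERDICT (by name: the statement is the Claim_ definition above) =====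
theorem full_segment_spec : Claim_equal_full_segment := by
  unfold Claim_equal_full_segment Spec_full_segment
  intro sentence word_dict _
  unfold full_segment full_segment_alt
  dsimp only []
  have hmem : ∀ l : Int, l ∈ (PySem.List.sorted (PySem.Set.ofList
        (((PySem.Dict.ofList word_dict).keys.filter (fun w => w != "")).map
          (fun w => PySem.Str.len w))) (fun x => x) true)
      ↔ ∃ w ∈ (PySem.Dict.ofList word_dict).keys, w ≠ "" ∧ PySem.Str.len w = l := by
    intro l
    rw [PySem.List.mem_sorted, PySem.Set.mem_ofList]
    simp only [List.mem_map, List.mem_filter, bne_iff_ne]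
    constructor
    · rintro ⟨w, ⟨hw1, hw2⟩, rfl⟩
      exact ⟨w, hw1, hw2, rfl⟩
    · rintro ⟨w, hw1, hw2, rfl⟩
      exact ⟨w, ⟨hw1, hw2⟩, rfl⟩
  have hdec : (PySem.List.sorted (PySem.Set.ofList
        (((PySem.Dict.ofList word_dict).keys.filter (fun w => w != "")).map
          (fun w => PySem.Str.len w))) (fun x => x) true).Pairwise (fun a b => b < a) := by
    have h1 := PySem.List.sorted_pairwise_rev (PySem.Set.ofList
        (((PySem.Dict.ofList word_dict).keys.filter (fun w => w != "")).map
          (fun w => PySem.Str.len w))) (fun x : Int => x)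
    have h2 : (PySem.List.sorted (PySem.Set.ofList
        (((PySem.Dict.ofList word_dict).keys.filter (fun w => w != "")).map
          (fun w => PySem.Str.len w))) (fun x : Int => x) true).Nodup :=
      ((PySem.List.sorted_perm _ _ _).nodup_iff).mpr (PySem.Set.nodup_ofList _)
    exact (h1.and h2).imp (by rintro a b ⟨hle, hne⟩; omega)
  have hz : ∀ m : Nat, (1 : Int) ≤ (m : Int) → m ≤ sentence.toList.length →
      (List.replicate (sentence.toList.length + 1) (0 : Int))[m]? = some 0 := by
    intro m _ hm
    rw [List.getElem?_replicate, if_pos (by omega)]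
  exact congrArg Prod.snd
    (pvOuter sentence.toList (PySem.Dict.ofList word_dict) _ hmem hdec
      sentence.toList.length 1 (List.replicate (sentence.toList.length + 1) 0) []
      (by omega) (by omega) hz)
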